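-- pv_equiv track=rewrite | github.com/pCarmonaa/chess-academic | api-server/src/analyzer/king_safety_analyzer.py | get_diagonal_positions_limited
-- ===== SOURCE A (Python) =====
-- def get_diagonal_positions_limited(position, direction, depth, board_size=8):
--     col, row = position[0], int(position[1])
--     col_delta, row_delta = direction
--     diagonal = []
--
--     for _ in range(depth):
--         col = chr(ord(col) + col_delta)
--         row += row_delta
--         if 'a' <= col <= 'h' and 1 <= row <= board_size:
--             diagonal.append(f"{col}{row}")
--         else:
--             break
--     return diagonal
-- ===== SOURCE B (Python) =====
-- def _limit(x, lo, hi, d, cap):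
--     """Consecutive steps i=1,2,... keeping lo <= x + i*d <= hi (cap = unbounded)."""
--     if d == 0:
--         return cap if lo <= x <= hi else 0
--     if d > 0:
--         return 0 if x + d < lo else max(0, (hi - x) // d)
--     return 0 if x + d > hi else max(0, (x - lo) // (-d))
--
--
-- def get_diagonal_positions_limited(position, direction, depth, board_size=8):
--     o, row = ord(position[0]), int(position[1])
--     cd, rd = direction
--     col_limit = _limit(o, ord('a'), ord('h'), cd, depth)
--     row_limit = _limit(row, 1, board_size, rd, depth)
--     n = max(0, min(depth, col_limit, row_limit))
--     return [f"{chr(o + i * cd)}{row + i * rd}" for i in range(1, n + 1)]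
-- ===== Notes on version B (the rewrite author's own statement) =====
-- stated objective: alternative
-- what changed: Replaces A's step-and-break loop by closed-form floor-division limits on how many steps the column and row stay in bounds, taking n = max(0, min(depth, col_limit, row_limit)) and emitting the squares in one uniform comprehension.
import Mathlib
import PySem

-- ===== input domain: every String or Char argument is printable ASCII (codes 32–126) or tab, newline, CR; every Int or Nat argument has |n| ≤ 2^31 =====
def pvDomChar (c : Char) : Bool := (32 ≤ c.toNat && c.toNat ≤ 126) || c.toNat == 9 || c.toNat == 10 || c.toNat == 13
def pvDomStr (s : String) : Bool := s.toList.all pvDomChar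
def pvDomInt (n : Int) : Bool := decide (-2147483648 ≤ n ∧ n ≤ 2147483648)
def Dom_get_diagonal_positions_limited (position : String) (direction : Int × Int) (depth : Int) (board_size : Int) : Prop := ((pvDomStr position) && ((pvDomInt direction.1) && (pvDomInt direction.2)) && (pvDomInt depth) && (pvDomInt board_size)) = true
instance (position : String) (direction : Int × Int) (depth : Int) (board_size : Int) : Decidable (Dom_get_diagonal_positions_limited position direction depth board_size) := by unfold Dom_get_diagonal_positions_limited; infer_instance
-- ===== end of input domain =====

-- ===== PORT A =====
-- B replaces A's step-and-break loop by a closed-form step count plus one uniform pass (alternative decomposition, no speed claim).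
-- shared transliteration of "col, row = position[0], int(position[1])" (identical first line of A and B)
def pvParse (position : String) : Option (Int × Int) :=
  match PySem.Str.pyGet? position 0, PySem.Str.pyGet? position 1 with
  | some c, some d =>
    match PySem.Int.ofStr? (String.mk [d]) with
    | some row => some (((c.toNat : Int)), row)
    | none => none
  | _, _ => none

-- f"{col}{row}" with col tracked as its code point
def pvMk (c r : Int) : String := String.mk [Char.ofNat c.toNat] ++ PySem.Int.toStr r

-- the for-loop of A; col is tracked as its code point (ord/chr become the identity on Int)
def pvALoop (cd rd bs : Int) : Nat → Int → Int → List String → List String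
  | 0, _, _, acc => acc
  | f+1, col, row, acc =>
    let col' := col + cd
    let row' := row + rd
    if 97 ≤ col' ∧ col' ≤ 104 ∧ 1 ≤ row' ∧ row' ≤ bs then
      pvALoop cd rd bs f col' row' (acc ++ [pvMk col' row'])
    else acc

def get_diagonal_positions_limited (position : String) (direction : Int × Int) (depth : Int) (board_size : Int) : List String :=
  match pvParse position with
  | none => []
  | some (col, row) => pvALoop direction.1 direction.2 board_size depth.toNat col row []

-- ===== PORT B =====
-- _limit of Source B
def pvLimit (x lo hi d cap : Int) : Int :=
  if d = 0 then (if lo ≤ x ∧ x ≤ hi then cap else 0)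
  else if 0 < d then (if x + d < lo then 0 else max 0 (PySem.Int.floordiv (hi - x) d))
  else (if hi < x + d then 0 else max 0 (PySem.Int.floordiv (x - lo) (-d)))

def get_diagonal_positions_limited_alt (position : String) (direction : Int × Int) (depth : Int) (board_size : Int) : List String :=
  match pvParse position with
  | none => []
  | some (o, row) =>
    let cd := direction.1
    let rd := direction.2
    let col_limit := pvLimit o 97 104 cd depth
    let row_limit := pvLimit row 1 board_size rd depth
    let n := max 0 (min depth (min col_limit row_limit))
    (PySem.List.pyRange 1 (n+1) 1).map (fun i => pvMk (o + i * cd) (row + i * rd))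

-- ===== PRECONDITION & SPEC =====
-- Pre_ excludes exactly the inputs on which the Python A raises: positions without a digit second
-- character (ValueError/IndexError) and column deltas that drive a computed chr() argument outside
-- the code-point range 0..0x10FFFF (ValueError).
def Pre_get_diagonal_positions_limited (position : String) (direction : Int × Int) (depth : Int) (board_size : Int) : Prop :=
  match position.toList with
  | c :: d :: _ =>
      ('0' ≤ d ∧ d ≤ '9') ∧
      (0 ≤ (c.toNat : Int) + direction.1 ∧ (c.toNat : Int) + direction.1 ≤ 1114111) ∧
      ((97 ≤ (c.toNat : Int) + direction.1 ∧ (c.toNat : Int) + direction.1 ≤ 104 ∧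
        1 ≤ ((d.toNat : Int) - 48) + direction.2 ∧ ((d.toNat : Int) - 48) + direction.2 ≤ board_size ∧
        2 ≤ depth) →
       (0 ≤ (c.toNat : Int) + 2 * direction.1 ∧ (c.toNat : Int) + 2 * direction.1 ≤ 1114111))
  | _ => False

instance (position : String) (direction : Int × Int) (depth : Int) (board_size : Int) : Decidable (Pre_get_diagonal_positions_limited position direction depth board_size) := by
  unfold Pre_get_diagonal_positions_limited
  rcases position.toList with _ | ⟨c, _ | ⟨d, t⟩⟩ <;> infer_instance

def pvWitness_get_diagonal_positions_limited : String × (Int × Int) × Int × Int := ("e4", (1, 1), 3, 8)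

def Spec_get_diagonal_positions_limited (position : String) (direction : Int × Int) (depth : Int) (board_size : Int) (out : List String) : Prop := out = get_diagonal_positions_limited_alt position direction depth board_size
instance (position : String) (direction : Int × Int) (depth : Int) (board_size : Int) (out : List String) : Decidable (Spec_get_diagonal_positions_limited position direction depth board_size out) := by unfold Spec_get_diagonal_positions_limited; infer_instance

-- ===== CLAIM (what is proved, stated in full; the proofs are below) =====
def Claim_equal_get_diagonal_positions_limited : Prop := ∀ (position : String) (direction : Int × Int) (depth : Int) (board_size : Int), Dom_get_diagonal_positions_limited position direction depth board_size → Pre_get_diagonal_positions_limited position direction depth board_size → Spec_get_diagonal_positions_limited position direction depth board_size (get_diagonal_positions_limited position direction depth board_size)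

-- ===== LEMMAS AND PROOFS =====
theorem pvWitness_ok :
    Dom_get_diagonal_positions_limited (pvWitness_get_diagonal_positions_limited.1) (pvWitness_get_diagonal_positions_limited.2.1) (pvWitness_get_diagonal_positions_limited.2.2.1) (pvWitness_get_diagonal_positions_limited.2.2.2) ∧
    Pre_get_diagonal_positions_limited (pvWitness_get_diagonal_positions_limited.1) (pvWitness_get_diagonal_positions_limited.2.1) (pvWitness_get_diagonal_positions_limited.2.2.1) (pvWitness_get_diagonal_positions_limited.2.2.2) := by
  decide

-- pvLimit is nonnegative when its cap is positive
theorem pvLimit_nonneg (x lo hi d cap : Int) (hcap : 0 < cap) : 0 ≤ pvLimit x lo hi d cap := by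
  unfold pvLimit
  split_ifs <;> omega

-- every step index up to pvLimit keeps the coordinate in bounds
theorem pvLimit_le (x lo hi d cap i : Int) (h1 : 1 ≤ i) (h2 : i ≤ pvLimit x lo hi d cap) :
    lo ≤ x + i * d ∧ x + i * d ≤ hi := by
  unfold pvLimit at h2
  by_cases h0 : d = 0
  · rw [if_pos h0] at h2
    subst h0
    by_cases hin : lo ≤ x ∧ x ≤ hi
    · simpa using hin
    · rw [if_neg hin] at h2; omega
  · rw [if_neg h0] at h2
    by_cases hpos : 0 < d
    · rw [if_pos hpos] at h2
      by_cases hlow : x + d < lo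
      · rw [if_pos hlow] at h2; omega
      · rw [if_neg hlow] at h2
        have hq : i ≤ PySem.Int.floordiv (hi - x) d := by omega
        have hub : i * d ≤ hi - x := (PySem.Int.le_floordiv_iff_mul_le hpos).mp hq
        refine ⟨?_, by omega⟩
        nlinarith [mul_nonneg (by omega : (0:Int) ≤ i - 1) (le_of_lt hpos)]
    · rw [if_neg hpos] at h2
      have hneg : 0 < -d := by omega
      by_cases hhi : hi < x + d
      · rw [if_pos hhi] at h2; omega
      · rw [if_neg hhi] at h2
        have hq : i ≤ PySem.Int.floordiv (x - lo) (-d) := by omega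
        have hub : i * (-d) ≤ x - lo := (PySem.Int.le_floordiv_iff_mul_le hneg).mp hq
        refine ⟨by nlinarith, ?_⟩
        nlinarith [mul_nonneg (by omega : (0:Int) ≤ i - 1) (le_of_lt hneg)]

-- one step past pvLimit leaves the bounds (when the cap was not the binding constraint)
theorem pvLimit_succ (x lo hi d cap : Int) (h : pvLimit x lo hi d cap < cap) :
    ¬ (lo ≤ x + (pvLimit x lo hi d cap + 1) * d ∧ x + (pvLimit x lo hi d cap + 1) * d ≤ hi) := by
  unfold pvLimit at *
  by_cases h0 : d = 0
  · rw [if_pos h0] at *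
    subst h0
    by_cases hin : lo ≤ x ∧ x ≤ hi
    · rw [if_pos hin] at h; omega
    · rw [if_neg hin] at *; intro hc; exact hin ⟨by omega, by omega⟩
  · rw [if_neg h0] at *
    by_cases hpos : 0 < d
    · rw [if_pos hpos] at *
      by_cases hlow : x + d < lo
      · rw [if_pos hlow] at *
        intro hc
        have : lo ≤ x + (0+1) * d := hc.1
        omega
      · rw [if_neg hlow] at *
        rcases le_or_gt 0 (PySem.Int.floordiv (hi - x) d) with hge | hlt
        · rw [max_eq_right hge]
          have hq : hi - x < (PySem.Int.floordiv (hi - x) d + 1) * d :=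
            (PySem.Int.floordiv_lt_iff_lt_mul hpos).mp (by omega)
          intro hc
          have := hc.2
          omega
        · rw [max_eq_left (by omega)]
          have hq : hi - x < 0 * d :=
            (PySem.Int.floordiv_lt_iff_lt_mul hpos).mp hlt
          intro hc
          have h2 := hc.2
          have e1 : (0:Int) * d = 0 := by ring
          have e2 : (0+1 : Int) * d = d := by ring
          omega
    · rw [if_neg hpos] at *
      have hneg : 0 < -d := by omega
      by_cases hhi : hi < x + d
      · rw [if_pos hhi] at *
        intro hc
        have : x + (0+1) * d ≤ hi := hc.2
        omega
      · rw [if_neg hhi] at *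
        rcases le_or_gt 0 (PySem.Int.floordiv (x - lo) (-d)) with hge | hlt
        · rw [max_eq_right hge]
          have hq : x - lo < (PySem.Int.floordiv (x - lo) (-d) + 1) * (-d) :=
            (PySem.Int.floordiv_lt_iff_lt_mul hneg).mp (by omega)
          intro hc
          have h1 := hc.1
          have e : (PySem.Int.floordiv (x - lo) (-d) + 1) * (-d)
              = -((PySem.Int.floordiv (x - lo) (-d) + 1) * d) := by ring
          omega
        · rw [max_eq_left (by omega)]
          have hq : x - lo < 0 * (-d) :=
            (PySem.Int.floordiv_lt_iff_lt_mul hneg).mp hlt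
          intro hc
          have h1 := hc.1
          have e1 : (0:Int) * (-d) = 0 := by ring
          have e2 : (0+1 : Int) * d = d := by ring
          omega

-- the loop of A produces exactly the first n squares, for any n with the prefix property
theorem pvALoop_eq (cd rd bs : Int) (fuel : Nat) :
    ∀ (c r : Int) (acc : List String) (n : Nat), n ≤ fuel →
    (∀ j : Nat, j < n →
      97 ≤ c + ((j:Int)+1) * cd ∧ c + ((j:Int)+1) * cd ≤ 104 ∧
      1 ≤ r + ((j:Int)+1) * rd ∧ r + ((j:Int)+1) * rd ≤ bs) →
    (n = fuel ∨ ¬ (97 ≤ c + ((n:Int)+1) * cd ∧ c + ((n:Int)+1) * cd ≤ 104 ∧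
                   1 ≤ r + ((n:Int)+1) * rd ∧ r + ((n:Int)+1) * rd ≤ bs)) →
    pvALoop cd rd bs fuel c r acc =
      acc ++ (List.range n).map (fun j : Nat => pvMk (c + ((j:Int)+1) * cd) (r + ((j:Int)+1) * rd)) := by
  induction fuel with
  | zero =>
    intro c r acc n hle _ _
    have hn : n = 0 := by omega
    subst hn
    simp [pvALoop]
  | succ f ih =>
    intro c r acc n hle hpre hstop
    cases n with
    | zero =>
      rcases hstop with h | h
      · omega
      · simp only [Nat.cast_zero, zero_add, one_mul] at h
        simp [pvALoop, h]
    | succ m =>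
      have h0 := hpre 0 (Nat.succ_pos m)
      simp only [Nat.cast_zero, zero_add, one_mul] at h0
      simp only [pvALoop, if_pos h0]
      rw [ih (c + cd) (r + rd) _ m (by omega)
        (by
          intro j hj
          have hx := hpre (j+1) (by omega)
          push_cast at hx ⊢
          refine ⟨by linarith [hx.1], by linarith [hx.2.1], by linarith [hx.2.2.1], by linarith [hx.2.2.2]⟩)
        (by
          rcases hstop with h | h
          · left; omega
          · right
            push_cast at h ⊢
            intro hc
            exact h ⟨by linarith [hc.1], by linarith [hc.2.1], by linarith [hc.2.2.1], by linarith [hc.2.2.2]⟩)]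
      rw [List.range_succ_eq_map]
      simp only [List.map_cons, List.map_map, List.cons_append, List.append_assoc,
        List.singleton_append, List.nil_append]
      congr 1
      congr 1
      · congr 1 <;> push_cast <;> ring
      · apply List.map_congr_left
        intro j _
        simp only [Function.comp_apply]
        congr 1 <;> push_cast <;> ring

-- main equivalence, after parsing
theorem pv_main (o r cd rd depth bs : Int) :
    pvALoop cd rd bs depth.toNat o r [] =
      (PySem.List.pyRange 1 (max 0 (min depth (min (pvLimit o 97 104 cd depth) (pvLimit r 1 bs rd depth))) + 1) 1).map
        (fun i => pvMk (o + i * cd) (r + i * rd)) := by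
  set lc := pvLimit o 97 104 cd depth with hlc
  set lr := pvLimit r 1 bs rd depth with hlr
  set n : Int := max 0 (min depth (min lc lr)) with hn
  have hn0 : 0 ≤ n := le_max_left _ _
  rw [PySem.List.pyRange_one 1 (n+1)]
  have hnt : (n + 1 - 1).toNat = n.toNat := by omega
  rw [hnt]
  rw [pvALoop_eq cd rd bs depth.toNat o r [] n.toNat (by omega)
    (by
      intro j hj
      have hj1 : (1:Int) ≤ (j:Int) + 1 := by omega
      have hc := pvLimit_le o 97 104 cd depth ((j:Int)+1) hj1 (by rw [← hlc]; omega)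
      have hr := pvLimit_le r 1 bs rd depth ((j:Int)+1) hj1 (by rw [← hlr]; omega)
      exact ⟨hc.1, hc.2, hr.1, hr.2⟩)
    (by
      rcases le_or_gt depth n with hd | hd
      · left; omega
      · right
        have hdp : 0 < depth := by omega
        have hlc0 : 0 ≤ lc := hlc ▸ pvLimit_nonneg _ _ _ _ _ hdp
        have hlr0 : 0 ≤ lr := hlr ▸ pvLimit_nonneg _ _ _ _ _ hdp
        have hcast : ((n.toNat : Int) + 1) = n + 1 := by omega
        rw [hcast]
        rcases le_or_gt lc lr with hw | hw
        · have hs := pvLimit_succ o 97 104 cd depth (by rw [← hlc]; omega)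
          rw [← hlc] at hs
          have hnv : n = lc := by omega
          rw [hnv]
          intro hc
          exact hs ⟨hc.1, hc.2.1⟩
        · have hs := pvLimit_succ r 1 bs rd depth (by rw [← hlr]; omega)
          rw [← hlr] at hs
          have hnv : n = lr := by omega
          rw [hnv]
          intro hc
          exact hs ⟨hc.2.2.1, hc.2.2.2⟩)]
  rw [List.map_map, List.nil_append]
  apply List.map_congr_left
  intro j _
  simp only [Function.comp_apply]
  congr 1 <;> push_cast <;> ring

-- ===== VERDICT (by name: the statement is the Claim_ definition above) =====
theorem get_diagonal_positions_limited_spec : Claim_equal_get_diagonal_positions_limited := by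
  intro position direction depth board_size _ _
  unfold Spec_get_diagonal_positions_limited
  unfold get_diagonal_positions_limited get_diagonal_positions_limited_alt
  cases hp : pvParse position with
  | none => rfl
  | some pr =>
    cases pr with
    | mk o row => exact pv_main o row direction.1 direction.2 depth board_size
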